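-- pv_equiv track=rewrite | github.com/tuusik/ege_solutions | battleship.py | checkShipStatus
-- ===== SOURCE A (Python) =====
-- def checkShipStatus(shipList, shipMap):
--     shipStatus = []
--     for index in range(len(shipList)):
--         shipStatus.append(False)
--     for index in range(len(shipList)):
--         for list in shipMap:
--             if shipList[index] in list:
--                 shipStatus[index] = True
--     return shipStatus
-- ===== SOURCE B (Python) =====
-- def checkShipStatus(shipList, shipMap):
--     # Invert the traversal: index each ship value -> all its indices in shipList,
--     # then let the map drive: every cell marks the indices of the matching ships.
--     index = {}
--     for i in range(len(shipList)):
--         index.setdefault(shipList[i], []).append(i)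
--     shipStatus = [False] * len(shipList)
--     for row in shipMap:
--         for cell in row:
--             for i in index.get(cell, ()):
--                 shipStatus[i] = True
--     return shipStatus
-- ===== Notes on version B (the rewrite author's own statement) =====
-- stated objective: faster
-- what changed: B inverts the traversal: it builds a dict from each ship value to the list of its indices, then makes a single pass over the map cells marking those indices, instead of A's per-ship rescan of the whole map.
import Mathlib
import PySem

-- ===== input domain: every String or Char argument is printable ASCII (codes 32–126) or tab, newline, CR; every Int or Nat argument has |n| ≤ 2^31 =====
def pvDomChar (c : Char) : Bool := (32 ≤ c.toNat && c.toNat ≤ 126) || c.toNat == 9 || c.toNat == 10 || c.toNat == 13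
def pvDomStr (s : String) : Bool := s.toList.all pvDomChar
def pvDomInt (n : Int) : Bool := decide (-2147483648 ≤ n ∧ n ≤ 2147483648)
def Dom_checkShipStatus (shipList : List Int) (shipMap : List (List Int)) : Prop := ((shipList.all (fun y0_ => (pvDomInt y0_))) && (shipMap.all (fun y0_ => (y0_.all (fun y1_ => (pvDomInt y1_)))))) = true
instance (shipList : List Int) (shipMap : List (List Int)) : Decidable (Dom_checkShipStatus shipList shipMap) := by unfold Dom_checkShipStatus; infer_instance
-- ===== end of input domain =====

-- B inverts the traversal: a dict maps each ship value to all its indices in shipList, and a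
-- single pass over the map cells marks those indices — instead of A's per-ship rescan of the map
-- (objective: faster).

-- ===== PORT A =====
-- literal transliteration: first loop appends False per ship; nested loops set shipStatus[index]
-- when a row contains shipList[index] (index drawn from range(len(shipList)), always in range,
-- so shipList.getD index 0 is exact for shipList[index])
def checkShipStatus (shipList : List Int) (shipMap : List (List Int)) : List Bool :=
  let shipStatus := (List.range shipList.length).foldl (fun acc _ => acc ++ [false]) []
  (List.range shipList.length).foldl
    (fun st index =>
      shipMap.foldl
        (fun st row => if row.contains (shipList.getD index 0) then st.set index true else st)
        st)
    shipStatus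

-- ===== PORT B =====
-- index.setdefault(shipList[i], []).append(i): read the current list (default []), append i,
-- store back under the same key (PySem.Dict.insert overwrites in place, like Python)
def pvBuildIndex (shipList : List Int) : PySem.Dict Int (List Nat) :=
  (List.range shipList.length).foldl
    (fun d i => d.insert (shipList.getD i 0) ((d.getD (shipList.getD i 0) []) ++ [i]))
    PySem.Dict.empty

-- the innermost loop: for i in index.get(cell, ()): shipStatus[i] = True
def pvMark (L : List Nat) (st : List Bool) : List Bool :=
  L.foldl (fun st j => st.set j true) st

def checkShipStatus_alt (shipList : List Int) (shipMap : List (List Int)) : List Bool :=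
  let index := pvBuildIndex shipList
  shipMap.foldl
    (fun st row => row.foldl (fun st cell => pvMark (index.getD cell []) st) st)
    (List.replicate shipList.length false)

-- ===== PRECONDITION & SPEC =====
def Spec_checkShipStatus (shipList : List Int) (shipMap : List (List Int)) (out : List Bool) : Prop := out = checkShipStatus_alt shipList shipMap
instance (shipList : List Int) (shipMap : List (List Int)) (out : List Bool) : Decidable (Spec_checkShipStatus shipList shipMap out) := by unfold Spec_checkShipStatus; infer_instance

-- ===== CLAIM (what is proved, stated in full; the proofs are below) =====
def Claim_equal_checkShipStatus : Prop := ∀ (shipList : List Int) (shipMap : List (List Int)), Dom_checkShipStatus shipList shipMap → Spec_checkShipStatus shipList shipMap (checkShipStatus shipList shipMap)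

-- ===== LEMMAS AND PROOFS =====

-- ---- A-side characterisation ----

-- the first loop of A builds replicate n false
lemma pv_init_replicate (n : Nat) :
    (List.range n).foldl (fun acc _ => acc ++ [false]) ([] : List Bool) = List.replicate n false := by
  induction n with
  | zero => simp
  | succ n ih => simp [List.range_succ, ih, List.replicate_succ']

-- the inner fold over the rows collapses to one conditional set
lemma pv_inner_fold (rows : List (List Int)) (v : Int) (i : Nat) (st : List Bool) :
    rows.foldl (fun st row => if row.contains v then st.set i true else st) st
      = if rows.any (fun row => row.contains v) then st.set i true else st := by
  induction rows generalizing st with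
  | nil => simp
  | cons r rs ih =>
    simp only [List.foldl_cons, List.any_cons, Bool.or_eq_true]
    by_cases h : r.contains v = true
    · rw [if_pos h, ih, if_pos (Or.inl h)]
      by_cases h2 : (rs.any fun row => row.contains v) = true
      · rw [if_pos h2, List.set_set]
      · rw [if_neg h2]
    · rw [if_neg h, ih]
      have hc : (r.contains v = true ∨ (rs.any fun row => row.contains v) = true)
          ↔ (rs.any fun row => row.contains v) = true := by tauto
      rw [if_congr hc rfl rfl]

-- the outer fold preserves the length
lemma pv_outer_len (p : Nat → Bool) (n : Nat) (st : List Bool) :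
    ((List.range n).foldl (fun st i => if p i then st.set i true else st) st).length = st.length := by
  induction n with
  | zero => simp
  | succ n ih =>
    rw [List.range_succ, List.foldl_append]
    by_cases h : p n <;> simp [h, ih]

-- the outer fold sets exactly the in-range indices whose predicate holds
lemma pv_outer_getD (p : Nat → Bool) (st : List Bool) (n : Nat) (hn : n ≤ st.length) (i : Nat) :
    ((List.range n).foldl (fun st i => if p i then st.set i true else st) st).getD i false
      = if i < n ∧ p i = true then true else st.getD i false := by
  induction n with
  | zero => simp
  | succ n ih =>
    have hn' : n ≤ st.length := Nat.le_of_succ_le hn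
    have hlen : ((List.range n).foldl (fun st i => if p i then st.set i true else st) st).length
        = st.length := pv_outer_len p n st
    rw [List.range_succ, List.foldl_append, List.foldl_cons, List.foldl_nil]
    by_cases h : p n = true
    · rw [if_pos h]
      rw [List.getD_eq_getElem?_getD, List.getElem?_set_of_lt' true _ (by omega)]
      by_cases hin : n = i
      · subst hin
        simp [h]
      · rw [if_neg hin, ← List.getD_eq_getElem?_getD, ih hn']
        have hc : (i < n + 1 ∧ p i = true) ↔ (i < n ∧ p i = true) := by
          constructor
          · rintro ⟨h1, h2⟩; exact ⟨by omega, h2⟩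
          · rintro ⟨h1, h2⟩; exact ⟨by omega, h2⟩
        rw [if_congr hc rfl rfl]
    · rw [if_neg h, ih hn']
      have hc : (i < n + 1 ∧ p i = true) ↔ (i < n ∧ p i = true) := by
        constructor
        · rintro ⟨h1, h2⟩
          rcases Nat.lt_succ_iff_lt_or_eq.mp h1 with h1 | rfl
          · exact ⟨h1, h2⟩
          · exact absurd h2 h
        · rintro ⟨h1, h2⟩; exact ⟨by omega, h2⟩
      rw [if_congr hc rfl rfl]

-- ---- B-side characterisation ----

-- membership in the value→indices index
lemma pv_index_mem (shipList : List Int) (v : Int) (i : Nat) :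
    i ∈ (pvBuildIndex shipList).getD v []
      ↔ i < shipList.length ∧ shipList.getD i 0 = v := by
  suffices H : ∀ (n : Nat) (d : PySem.Dict Int (List Nat)),
      (i ∈ ((List.range n).foldl
        (fun d i => d.insert (shipList.getD i 0) ((d.getD (shipList.getD i 0) []) ++ [i])) d).getD v []
       ↔ i ∈ d.getD v [] ∨ (i < n ∧ shipList.getD i 0 = v)) by
    rw [pvBuildIndex, H shipList.length PySem.Dict.empty]
    simp [PySem.Dict.getD]
  intro n
  induction n with
  | zero => simp
  | succ n ih =>
    intro d
    rw [List.range_succ, List.foldl_append, List.foldl_cons, List.foldl_nil]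
    rw [PySem.Dict.getD_insert]
    by_cases hv : v = shipList.getD n 0
    · rw [if_pos hv, ← hv]
      simp only [List.mem_append, List.mem_singleton, ih]
      constructor
      · rintro ((h | ⟨h1, h2⟩) | rfl)
        · exact Or.inl h
        · exact Or.inr ⟨by omega, h2⟩
        · exact Or.inr ⟨by omega, hv.symm⟩
      · rintro (h | ⟨h1, h2⟩)
        · exact Or.inl (Or.inl h)
        · rcases Nat.lt_succ_iff_lt_or_eq.mp h1 with h1 | rfl
          · exact Or.inl (Or.inr ⟨h1, h2⟩)
          · exact Or.inr rfl
    · rw [if_neg hv]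
      rw [ih]
      constructor
      · rintro (h | ⟨h1, h2⟩)
        · exact Or.inl h
        · exact Or.inr ⟨by omega, h2⟩
      · rintro (h | ⟨h1, h2⟩)
        · exact Or.inl h
        · rcases Nat.lt_succ_iff_lt_or_eq.mp h1 with h1 | rfl
          · exact Or.inr ⟨h1, h2⟩
          · exact absurd h2.symm hv

-- pvMark preserves length
lemma pv_mark_len (L : List Nat) (st : List Bool) : (pvMark L st).length = st.length := by
  induction L generalizing st with
  | nil => rfl
  | cons j L ih => simp only [pvMark, List.foldl_cons] at *; rw [ih]; simp

-- pvMark sets exactly the listed indices (i in range)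
lemma pv_mark_getD (L : List Nat) (st : List Bool) (i : Nat) (hi : i < st.length) :
    (pvMark L st).getD i false = if i ∈ L then true else st.getD i false := by
  induction L generalizing st with
  | nil => simp [pvMark]
  | cons j L ih =>
    simp only [pvMark, List.foldl_cons] at *
    rw [ih _ (by simpa using hi)]
    by_cases hj : i = j
    · subst hj
      simp only [List.mem_cons, true_or, if_pos trivial]
      split_ifs with h
      · rfl
      · rw [List.getD_eq_getElem _ _ (by simpa using hi)]
        simp
    · have hc : i ∈ j :: L ↔ i ∈ L := by simp [List.mem_cons, hj]
      rw [if_congr hc rfl rfl]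
      split_ifs with h
      · rfl
      · simp [List.getD_eq_getElem?_getD, List.getElem?_set_ne (by omega : j ≠ i)]

-- one row's fold preserves length and marks the union of the cells' index lists
lemma pv_row_len (g : Int → List Nat) (row : List Int) (st : List Bool) :
    (row.foldl (fun st cell => pvMark (g cell) st) st).length = st.length := by
  induction row generalizing st with
  | nil => rfl
  | cons c cs ih => simp only [List.foldl_cons]; rw [ih, pv_mark_len]

lemma pv_row_getD (g : Int → List Nat) (row : List Int) (st : List Bool) (i : Nat)
    (hi : i < st.length) :
    (row.foldl (fun st cell => pvMark (g cell) st) st).getD i false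
      = if ∃ cell ∈ row, i ∈ g cell then true else st.getD i false := by
  induction row generalizing st with
  | nil => simp
  | cons c cs ih =>
    simp only [List.foldl_cons]
    rw [ih _ (by rw [pv_mark_len]; exact hi), pv_mark_getD _ _ _ hi]
    by_cases hc : i ∈ g c
    · have hx : ∃ cell ∈ c :: cs, i ∈ g cell := ⟨c, List.mem_cons_self, hc⟩
      simp only [hc, if_true, if_pos hx]
      split_ifs <;> rfl
    · have hcc : (∃ cell ∈ c :: cs, i ∈ g cell) ↔ ∃ cell ∈ cs, i ∈ g cell := by
        simp only [List.mem_cons]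
        constructor
        · rintro ⟨cell, (rfl | h), hm⟩
          · exact absurd hm hc
          · exact ⟨cell, h, hm⟩
        · rintro ⟨cell, h, hm⟩; exact ⟨cell, Or.inr h, hm⟩
      rw [if_congr hcc rfl rfl, if_neg hc]

-- the full map pass preserves length and marks the union over all rows
lemma pv_map_len (g : Int → List Nat) (rows : List (List Int)) (st : List Bool) :
    (rows.foldl (fun st row => row.foldl (fun st cell => pvMark (g cell) st) st) st).length
      = st.length := by
  induction rows generalizing st with
  | nil => rfl
  | cons r rs ih => simp only [List.foldl_cons]; rw [ih, pv_row_len]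

lemma pv_map_getD (g : Int → List Nat) (rows : List (List Int)) (st : List Bool) (i : Nat)
    (hi : i < st.length) :
    (rows.foldl (fun st row => row.foldl (fun st cell => pvMark (g cell) st) st) st).getD i false
      = if ∃ row ∈ rows, ∃ cell ∈ row, i ∈ g cell then true else st.getD i false := by
  induction rows generalizing st with
  | nil => simp
  | cons r rs ih =>
    simp only [List.foldl_cons]
    rw [ih _ (by rw [pv_row_len]; exact hi), pv_row_getD _ _ _ _ hi]
    by_cases hr : ∃ cell ∈ r, i ∈ g cell
    · have hx : ∃ row ∈ r :: rs, ∃ cell ∈ row, i ∈ g cell := ⟨r, List.mem_cons_self, hr⟩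
      simp only [hr, if_true, if_pos hx]
      split_ifs <;> rfl
    · have hcc : (∃ row ∈ r :: rs, ∃ cell ∈ row, i ∈ g cell)
          ↔ ∃ row ∈ rs, ∃ cell ∈ row, i ∈ g cell := by
        simp only [List.mem_cons]
        constructor
        · rintro ⟨row, (rfl | h), hm⟩
          · exact absurd hm hr
          · exact ⟨row, h, hm⟩
        · rintro ⟨row, h, hm⟩; exact ⟨row, Or.inr h, hm⟩
      rw [if_congr hcc rfl rfl, if_neg hr]

-- ===== VERDICT (by name: the statement is the Claim_ definition above) =====
theorem checkShipStatus_spec : Claim_equal_checkShipStatus := by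
  intro shipList shipMap _
  unfold Spec_checkShipStatus checkShipStatus checkShipStatus_alt
  simp only [pv_init_replicate, pv_inner_fold]
  apply List.ext_getElem
  · rw [pv_outer_len, pv_map_len]
  · intro i h1 h2
    have hi : i < shipList.length := by
      rw [pv_outer_len, List.length_replicate] at h1; exact h1
    rw [← List.getD_eq_getElem _ false h1, ← List.getD_eq_getElem _ false h2]
    rw [pv_outer_getD _ _ _ (by simp),
        pv_map_getD _ _ _ _ (by simpa using hi)]
    have hiff : (shipMap.any fun row => row.contains (shipList.getD i 0)) = true
        ↔ ∃ row ∈ shipMap, ∃ cell ∈ row, i ∈ (pvBuildIndex shipList).getD cell [] := by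
      simp only [List.any_eq_true]
      constructor
      · rintro ⟨row, hr, hcell⟩
        refine ⟨row, hr, shipList.getD i 0, by simpa using hcell, ?_⟩
        rw [pv_index_mem]
        exact ⟨hi, rfl⟩
      · rintro ⟨row, hr, cell, hc, him⟩
        rw [pv_index_mem] at him
        exact ⟨row, hr, by rw [him.2]; simpa using hc⟩
    by_cases hA : (shipMap.any fun row => row.contains (shipList.getD i 0)) = true
    · rw [if_pos ⟨hi, hA⟩, if_pos (hiff.mp hA)]
    · rw [if_neg (by tauto), if_neg (fun h => hA (hiff.mpr h))]
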